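-- pv_equiv track=rewrite | github.com/nickcdryan/textevolve | scripts/current_script_19.py | verify_slots
-- ===== SOURCE A (Python) =====
-- def verify_slots(slots, schedules, participants):
--     """
--     Verifies time slots against participant schedules, using LLM-like
--     reasoning for conflict detection.
--     """
--     valid_slots = []
--     for slot in slots:
--         start_time = slot[0] * 60 + slot[1]
--         end_time = slot[2] * 60 + slot[3]
--         is_valid = True
--         for person in participants:
--             if person in schedules:
--                 for busy_start, busy_end in schedules[person]:
--                     if start_time < busy_end and end_time > busy_start:
--                         is_valid = False
--                         break
--             if not is_valid:
--                 break
--         if is_valid: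
--             valid_slots.append(slot)
--     return valid_slots
-- ===== SOURCE B (Python) =====
-- def verify_slots(slots, schedules, participants):
--     """Same result: collect busy intervals once, sort by start, prefix-max of
--     ends, then answer each slot with one binary search (dominance query)."""
--     busy = []
--     for person in participants:
--         if person in schedules:
--             busy.extend(schedules[person])
--     busy.sort(key=lambda iv: iv[0])
--     starts = [iv[0] for iv in busy]
--     premax = []
--     m = None
--     for _, be in busy:
--         if m is None or be > m:
--             m = be
--         premax.append(m)
--
--     def count_lt(x):
--         lo, hi = 0, len(starts)
--         while lo < hi:
--             mid = (lo + hi) // 2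
--             if starts[mid] < x:
--                 lo = mid + 1
--             else:
--                 hi = mid
--         return lo
--
--     valid_slots = []
--     for slot in slots:
--         start_time = slot[0] * 60 + slot[1]
--         end_time = slot[2] * 60 + slot[3]
--         k = count_lt(end_time)
--         if k == 0 or premax[k - 1] <= start_time:
--             valid_slots.append(slot)
--     return valid_slots
-- ===== Notes on version B (the rewrite author's own statement) =====
-- stated objective: faster
-- what changed: Busy intervals of the listed participants are collected once, sorted by start with a running prefix-max of end times, and each slot is then checked with a single binary search (a 2-D dominance query) instead of rescanning every participant's interval list per slot.
import Mathlib
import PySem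

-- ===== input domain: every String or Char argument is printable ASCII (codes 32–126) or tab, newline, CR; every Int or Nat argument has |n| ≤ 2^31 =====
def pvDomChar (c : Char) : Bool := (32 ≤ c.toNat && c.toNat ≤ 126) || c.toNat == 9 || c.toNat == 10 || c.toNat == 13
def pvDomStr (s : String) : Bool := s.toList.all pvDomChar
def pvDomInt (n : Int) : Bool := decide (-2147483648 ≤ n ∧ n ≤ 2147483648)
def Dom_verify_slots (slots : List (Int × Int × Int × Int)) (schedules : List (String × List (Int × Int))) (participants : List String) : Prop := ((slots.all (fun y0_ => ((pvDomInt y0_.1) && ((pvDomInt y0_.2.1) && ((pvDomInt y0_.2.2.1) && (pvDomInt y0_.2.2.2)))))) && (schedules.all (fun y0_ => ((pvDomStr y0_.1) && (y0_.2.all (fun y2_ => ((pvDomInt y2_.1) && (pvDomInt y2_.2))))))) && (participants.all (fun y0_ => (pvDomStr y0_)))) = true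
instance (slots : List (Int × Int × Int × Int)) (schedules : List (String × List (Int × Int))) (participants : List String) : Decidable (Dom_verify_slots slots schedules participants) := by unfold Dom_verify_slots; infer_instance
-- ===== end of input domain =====

-- B collects the relevant busy intervals once, sorts them by start with a prefix-max of
-- end times, and answers each slot with one binary search; A rescans every participant's
-- intervals for every slot.  Objective: faster (asymptotic).

-- ===== PORT A =====
-- 'person in schedules' + 'schedules[person]' : first-match lookup in the association list
def pvLookup (schedules : List (String × List (Int × Int))) (p : String) : Option (List (Int × Int)) :=
  match schedules.find? (fun kv => kv.1 == p) with
  | some kv => some kv.2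
  | none => none

-- the inner 'for busy_start, busy_end in …: if …: is_valid = False; break' loop
def pvInnerA (s e : Int) : List (Int × Int) → Bool
  | [] => true
  | (bs, be) :: rest => if s < be ∧ e > bs then false else pvInnerA s e rest

-- the 'for person in participants: …; if not is_valid: break' loop
def pvPersonsA (schedules : List (String × List (Int × Int))) (s e : Int) : List String → Bool
  | [] => true
  | p :: rest =>
    let ok := match pvLookup schedules p with
      | some ivs => pvInnerA s e ivs
      | none => true
    if ok then pvPersonsA schedules s e rest else false

def verify_slots (slots : List (Int × Int × Int × Int)) (schedules : List (String × List (Int × Int))) (participants : List String) : List (Int × Int × Int × Int) :=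
  slots.foldl (fun acc slot =>
    let s := slot.1 * 60 + slot.2.1
    let e := slot.2.2.1 * 60 + slot.2.2.2
    if pvPersonsA schedules s e participants then acc ++ [slot] else acc) []

-- ===== PORT B =====
-- 'busy = []; for person in participants: if person in schedules: busy.extend(schedules[person])'
def pvBusy (schedules : List (String × List (Int × Int))) (participants : List String) : List (Int × Int) :=
  participants.foldl (fun acc p =>
    match pvLookup schedules p with
    | some ivs => acc ++ ivs
    | none => acc) []

-- 'm = None; for _, be in busy: if m is None or be > m: m = be; premax.append(m)'
def pvPremax : List (Int × Int) → Option Int → List Int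
  | [], _ => []
  | (_, be) :: rest, m =>
    let m' := match m with
      | none => be
      | some v => if be > v then be else v
    m' :: pvPremax rest (some m')

-- the hand-written 'while lo < hi' binary search; lo, hi are nonnegative throughout in
-- the Python, so Nat with '/ 2' matches '(lo + hi) // 2' exactly
def pvCountLt (starts : List Int) (x : Int) (lo hi : Nat) : Nat :=
  if lo < hi then
    let mid := (lo + hi) / 2
    if starts.getD mid 0 < x then pvCountLt starts x (mid + 1) hi
    else pvCountLt starts x lo mid
  else lo
termination_by hi - lo
decreasing_by all_goals omega

def verify_slots_alt (slots : List (Int × Int × Int × Int)) (schedules : List (String × List (Int × Int))) (participants : List String) : List (Int × Int × Int × Int) :=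
  let busy := PySem.List.sorted (pvBusy schedules participants) (fun iv => iv.1) false
  let starts := busy.map (fun iv => iv.1)
  let premax := pvPremax busy none
  slots.foldl (fun acc slot =>
    let s := slot.1 * 60 + slot.2.1
    let e := slot.2.2.1 * 60 + slot.2.2.2
    let k := pvCountLt starts e 0 starts.length
    if k = 0 ∨ premax.getD (k - 1) 0 ≤ s then acc ++ [slot] else acc) []

-- ===== PRECONDITION & SPEC =====
def Spec_verify_slots (slots : List (Int × Int × Int × Int)) (schedules : List (String × List (Int × Int))) (participants : List String) (out : List (Int × Int × Int × Int)) : Prop := out = verify_slots_alt slots schedules participants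
instance (slots : List (Int × Int × Int × Int)) (schedules : List (String × List (Int × Int))) (participants : List String) (out : List (Int × Int × Int × Int)) : Decidable (Spec_verify_slots slots schedules participants out) := by unfold Spec_verify_slots; infer_instance

-- ===== CLAIM (what is proved, stated in full; the proofs are below) =====
def Claim_equal_verify_slots : Prop := ∀ (slots : List (Int × Int × Int × Int)) (schedules : List (String × List (Int × Int))) (participants : List String), Dom_verify_slots slots schedules participants → Spec_verify_slots slots schedules participants (verify_slots slots schedules participants)

-- ===== LEMMAS AND PROOFS =====

-- interval iv blocks the slot [s, e)
def pvBlocks (s e : Int) (iv : Int × Int) : Bool := decide (s < iv.2) && decide (e > iv.1)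

-- B's precomputed data, named for the lemmas below
def pvSB (schedules : List (String × List (Int × Int))) (parts : List String) : List (Int × Int) :=
  PySem.List.sorted (pvBusy schedules parts) (fun iv => iv.1) false

def pvStarts (schedules : List (String × List (Int × Int))) (parts : List String) : List Int :=
  (pvSB schedules parts).map (fun iv => iv.1)

def pvK (schedules : List (String × List (Int × Int))) (parts : List String) (e : Int) : Nat :=
  pvCountLt (pvStarts schedules parts) e 0 (pvStarts schedules parts).length

theorem pvInnerA_eq_all (s e : Int) (l : List (Int × Int)) :
    pvInnerA s e l = l.all (fun iv => ! pvBlocks s e iv) := by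
  induction l with
  | nil => rfl
  | cons iv rest ih =>
    obtain ⟨bs, be⟩ := iv
    by_cases h : s < be ∧ e > bs
    · simp only [pvInnerA, List.all_cons]
      rw [if_pos h]
      simp [pvBlocks, h.1, h.2]
    · have hb : (! pvBlocks s e (bs, be)) = true := by
        rcases not_and_or.mp h with h1 | h1 <;> simp [pvBlocks, h1]
      simp only [pvInnerA, List.all_cons]
      rw [if_neg h, ih, hb, Bool.true_and]

theorem pvBusy_eq_flatMap (schedules : List (String × List (Int × Int))) (ps : List String) :
    pvBusy schedules ps = ps.flatMap (fun p => (pvLookup schedules p).getD []) := by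
  unfold pvBusy
  rw [show (fun (acc : List (Int × Int)) (p : String) =>
        match pvLookup schedules p with
        | some ivs => acc ++ ivs
        | none => acc)
      = (fun acc p => acc ++ (pvLookup schedules p).getD []) from by
      funext acc p; cases pvLookup schedules p <;> simp]
  exact (PySem.List.foldl_append_eq_flatMap _ ps []).trans (List.nil_append _)

theorem pvPersonsA_eq_all (schedules : List (String × List (Int × Int))) (s e : Int)
    (parts : List String) :
    pvPersonsA schedules s e parts = (pvBusy schedules parts).all (fun iv => ! pvBlocks s e iv) := by
  induction parts with
  | nil => simp [pvPersonsA, pvBusy]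
  | cons p rest ih =>
    rw [pvBusy_eq_flatMap, List.flatMap_cons, List.all_append, ← pvBusy_eq_flatMap]
    simp only [pvPersonsA, ← ih]
    cases hl : pvLookup schedules p with
    | none => simp
    | some ivs =>
      simp only [Option.getD_some, pvInnerA_eq_all s e ivs]
      by_cases h : ivs.all (fun iv => ! pvBlocks s e iv) = true <;> simp [h]

-- binary-search invariant: on a (· ≤ ·)-sorted list, pvCountLt splits at the '< x' boundary
theorem pvCountLt_char (starts : List Int) (hs : starts.Pairwise (· ≤ ·)) (x : Int) :
    ∀ d lo hi, hi - lo = d → lo ≤ hi → hi ≤ starts.length →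
    (∀ i, i < lo → starts.getD i 0 < x) →
    (∀ i, hi ≤ i → i < starts.length → ¬ starts.getD i 0 < x) →
    (pvCountLt starts x lo hi ≤ starts.length ∧
     (∀ i, i < pvCountLt starts x lo hi → starts.getD i 0 < x) ∧
     (∀ i, pvCountLt starts x lo hi ≤ i → i < starts.length → ¬ starts.getD i 0 < x)) := by
  have hmono : ∀ i j, i ≤ j → j < starts.length → starts.getD i 0 ≤ starts.getD j 0 := by
    intro i j hij hj
    have hi' : i < starts.length := lt_of_le_of_lt hij hj
    rw [List.getD_eq_getElem _ _ hi', List.getD_eq_getElem _ _ hj]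
    rcases Nat.lt_or_ge i j with h | h
    · exact List.pairwise_iff_getElem.mp hs i j hi' hj h
    · have : i = j := by omega
      subst this; exact le_refl _
  intro d
  induction d using Nat.strong_induction_on with
  | _ d ih =>
  intro lo hi hd hle hhi hlow hhigh
  rw [pvCountLt]
  by_cases h : lo < hi
  · rw [if_pos h]
    simp only []
    have hmlen : (lo + hi) / 2 < starts.length := by omega
    by_cases hm : starts.getD ((lo + hi) / 2) 0 < x
    · rw [if_pos hm]
      exact ih (hi - ((lo + hi) / 2 + 1)) (by omega) ((lo + hi) / 2 + 1) hi rfl (by omega) hhi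
        (fun i hi' => lt_of_le_of_lt (hmono i ((lo + hi) / 2) (by omega) hmlen) hm) hhigh
    · rw [if_neg hm]
      exact ih (((lo + hi) / 2) - lo) (by omega) lo ((lo + hi) / 2) rfl (by omega) (by omega)
        hlow (fun i hi1 hi2 hlt => hm (lt_of_le_of_lt (hmono ((lo + hi) / 2) i hi1 hi2) hlt))
  · rw [if_neg h]
    have : lo = hi := by omega
    exact ⟨by omega, hlow, by rw [this]; exact hhigh⟩

-- prefix-max: premax[j] > s iff some end among the first j+1 intervals exceeds s
theorem pvPremax_getD_gt (s : Int) :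
    ∀ (l : List (Int × Int)) (v : Int) (j : Nat), j < l.length →
    (s < (pvPremax l (some v)).getD j 0 ↔
      s < v ∨ ∃ i, ∃ h : i < l.length, i ≤ j ∧ s < (l[i]'h).2) := by
  intro l
  induction l with
  | nil => intro v j hj; simp at hj
  | cons iv rest ih =>
    intro v j hj
    obtain ⟨bs, be⟩ := iv
    match j with
    | 0 =>
      simp only [pvPremax, List.getD_cons_zero]
      constructor
      · intro h
        by_cases hbv : be > v
        · rw [if_pos hbv] at h
          exact Or.inr ⟨0, by simp, by omega, h⟩
        · rw [if_neg hbv] at h; exact Or.inl h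
      · rintro (h | ⟨i, hilen, hij, hival⟩)
        · split <;> omega
        · have : i = 0 := by omega
          subst this
          simp only [List.getElem_cons_zero] at hival
          split <;> omega
    | j' + 1 =>
      simp only [pvPremax, List.getD_cons_succ]
      rw [ih _ j' (by simpa using Nat.lt_of_succ_lt_succ hj)]
      constructor
      · rintro (h | ⟨i, hilen, hij, hival⟩)
        · by_cases hbv : be > v
          · rw [if_pos hbv] at h
            exact Or.inr ⟨0, by simp, by omega, by simpa using h⟩
          · rw [if_neg hbv] at h; exact Or.inl h
        · exact Or.inr ⟨i + 1, by simpa using Nat.succ_lt_succ hilen, by omega, by simpa using hival⟩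
      · rintro (h | ⟨i, hilen, hij, hival⟩)
        · refine Or.inl ?_; split <;> omega
        · match i with
          | 0 =>
            simp only [List.getElem_cons_zero] at hival
            refine Or.inl ?_; split <;> omega
          | i' + 1 =>
            exact Or.inr ⟨i', by simpa using Nat.lt_of_succ_lt_succ hilen, by omega,
              by simpa using hival⟩

theorem pvPremax_getD_gt_none (s : Int) (l : List (Int × Int)) (j : Nat) (hj : j < l.length) :
    s < (pvPremax l none).getD j 0 ↔ ∃ i, ∃ h : i < l.length, i ≤ j ∧ s < (l[i]'h).2 := by
  match l, hj with
  | (bs, be) :: rest, hj =>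
    match j with
    | 0 =>
      simp only [pvPremax, List.getD_cons_zero]
      constructor
      · intro h; exact ⟨0, by simp, le_refl _, by simpa using h⟩
      · rintro ⟨i, hilen, hij, hival⟩
        have : i = 0 := by omega
        subst this; simpa using hival
    | j' + 1 =>
      simp only [pvPremax, List.getD_cons_succ]
      rw [pvPremax_getD_gt s rest be j' (by simpa using Nat.lt_of_succ_lt_succ hj)]
      constructor
      · rintro (h | ⟨i, hilen, hij, hival⟩)
        · exact ⟨0, by simp, by omega, by simpa using h⟩
        · exact ⟨i + 1, by simpa using Nat.succ_lt_succ hilen, by omega, by simpa using hival⟩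
      · rintro ⟨i, hilen, hij, hival⟩
        match i with
        | 0 => exact Or.inl (by simpa using hival)
        | i' + 1 =>
          exact Or.inr ⟨i', by simpa using Nat.lt_of_succ_lt_succ hilen, by omega,
            by simpa using hival⟩

-- the per-slot test of B equals the per-slot test of A
theorem pvCond_iff (schedules : List (String × List (Int × Int))) (parts : List String)
    (s e : Int) :
    (pvPersonsA schedules s e parts = true) ↔
      (pvK schedules parts e = 0 ∨
       (pvPremax (pvSB schedules parts) none).getD (pvK schedules parts e - 1) 0 ≤ s) := by
  unfold pvK pvStarts pvSB
  set sb := PySem.List.sorted (pvBusy schedules parts) (fun iv => iv.1) false with hsb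
  set starts := sb.map (fun iv => iv.1) with hstarts
  set k := pvCountLt starts e 0 starts.length with hk
  have hperm : sb.Perm (pvBusy schedules parts) := PySem.List.sorted_perm _ _ _
  have hstartsLen : starts.length = sb.length := by simp [hstarts]
  have hstartsGet : ∀ i (h : i < sb.length), starts.getD i 0 = (sb[i]'h).1 := by
    intro i h
    rw [List.getD_eq_getElem _ _ (by simpa [hstarts] using h)]
    simp [hstarts]
  have hsorted : starts.Pairwise (· ≤ ·) := by
    have := PySem.List.sorted_pairwise (xs := pvBusy schedules parts) (key := fun iv => iv.1)
    rw [← hsb] at this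
    simpa [hstarts, List.pairwise_map] using this
  obtain ⟨hkle, hklow, hkhigh⟩ := pvCountLt_char starts hsorted e (starts.length - 0)
    0 starts.length rfl (by omega) (le_refl _) (by omega) (by omega)
  rw [← hk] at hkle hklow hkhigh
  -- A's test, transported to the sorted list
  have hA : (pvPersonsA schedules s e parts = true) ↔
      ¬ ∃ i, ∃ h : i < sb.length, (sb[i]'h).1 < e ∧ s < (sb[i]'h).2 := by
    rw [pvPersonsA_eq_all]
    simp only [List.all_eq_true]
    constructor
    · rintro hall ⟨i, hilen, h1, h2⟩
      have hm : sb[i] ∈ pvBusy schedules parts := hperm.mem_iff.mp (List.getElem_mem hilen)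
      have := hall _ hm
      simp [pvBlocks] at this
      omega
    · intro hne iv hmem
      have hmem' : iv ∈ sb := hperm.mem_iff.mpr hmem
      obtain ⟨i, hilen, hgi⟩ := List.getElem_of_mem hmem'
      by_contra hbad
      simp [pvBlocks] at hbad
      exact hne ⟨i, hilen, by rw [hgi]; omega, by rw [hgi]; omega⟩
  rw [hA]
  constructor
  · intro hne
    by_cases hk0 : k = 0
    · exact Or.inl hk0
    · refine Or.inr ?_
      by_contra hgt
      push_neg at hgt
      rw [pvPremax_getD_gt_none s sb (k - 1) (by omega)] at hgt
      obtain ⟨i, hilen, hij, hival⟩ := hgt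
      have h1 : starts.getD i 0 < e := hklow i (by omega)
      rw [hstartsGet i hilen] at h1
      exact hne ⟨i, hilen, h1, hival⟩
  · rintro (hk0 | hle) ⟨i, hilen, h1, h2⟩
    · have := hkhigh i (by omega) (by omega)
      rw [hstartsGet i hilen] at this
      omega
    · have hik : i < k := by
        by_contra hik
        have := hkhigh i (by omega) (by omega)
        rw [hstartsGet i hilen] at this
        omega
      have : s < (pvPremax sb none).getD (k - 1) 0 := by
        rw [pvPremax_getD_gt_none s sb (k - 1) (by omega)]
        exact ⟨i, hilen, by omega, h2⟩
      omega

-- ===== VERDICT (by name: the statement is the Claim_ definition above) =====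
theorem verify_slots_spec : Claim_equal_verify_slots := by
  intro slots schedules participants _
  show slots.foldl (fun acc slot =>
      if pvPersonsA schedules (slot.1 * 60 + slot.2.1) (slot.2.2.1 * 60 + slot.2.2.2)
          participants then acc ++ [slot] else acc) []
    = slots.foldl (fun acc slot =>
      if pvK schedules participants (slot.2.2.1 * 60 + slot.2.2.2) = 0 ∨
          (pvPremax (pvSB schedules participants) none).getD
            (pvK schedules participants (slot.2.2.1 * 60 + slot.2.2.2) - 1) 0
            ≤ slot.1 * 60 + slot.2.1
      then acc ++ [slot] else acc) []
  congr 1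
  funext acc slot
  have hiff := pvCond_iff schedules participants (slot.1 * 60 + slot.2.1)
    (slot.2.2.1 * 60 + slot.2.2.2)
  by_cases h : pvPersonsA schedules (slot.1 * 60 + slot.2.1)
      (slot.2.2.1 * 60 + slot.2.2.2) participants = true
  · rw [if_pos h, if_pos (hiff.mp h)]
  · rw [if_neg (by simpa using h), if_neg (fun hc => h (hiff.mpr hc))]
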